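-- pv_equiv track=rewrite | github.com/techguru-nya/make_measurement | make_measurement.py | SEARCH_GLOBAL_KEY
-- ===== SOURCE A (Python) =====
-- def SEARCH_GLOBAL_KEY(d_Sig):
--     d_Glo = {}
--     l_Key = []
--
--     for S in d_Sig:
--         if '.' not in S:
--             S_ = S.split('_')
--             d_Glo[S] = S_[0]
--             l_Key.append(S_[0])
--
--     l_Key_set = set(l_Key)
--
--     d_Key = {}
--
--     for K in l_Key_set:
--         l_ = []
--
--         for S in d_Glo:
--             if K == d_Glo[S]:
--                 l_.append(S)
--
--         d_Key[K] = l_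
--
--     return d_Key
-- ===== SOURCE B (Python) =====
-- def SEARCH_GLOBAL_KEY(d_Sig):
--     d_Key = {}
--     for S in d_Sig:
--         if '.' not in S:
--             d_Key.setdefault(S.split('_')[0], []).append(S)
--     return d_Key
-- ===== Notes on version B (the rewrite author's own statement) =====
-- stated objective: faster
-- what changed: One pass with dict.setdefault grouping each dotless key under its prefix directly, replacing A's intermediate prefix map plus a scan of all keys for every distinct prefix.
import Mathlib
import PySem

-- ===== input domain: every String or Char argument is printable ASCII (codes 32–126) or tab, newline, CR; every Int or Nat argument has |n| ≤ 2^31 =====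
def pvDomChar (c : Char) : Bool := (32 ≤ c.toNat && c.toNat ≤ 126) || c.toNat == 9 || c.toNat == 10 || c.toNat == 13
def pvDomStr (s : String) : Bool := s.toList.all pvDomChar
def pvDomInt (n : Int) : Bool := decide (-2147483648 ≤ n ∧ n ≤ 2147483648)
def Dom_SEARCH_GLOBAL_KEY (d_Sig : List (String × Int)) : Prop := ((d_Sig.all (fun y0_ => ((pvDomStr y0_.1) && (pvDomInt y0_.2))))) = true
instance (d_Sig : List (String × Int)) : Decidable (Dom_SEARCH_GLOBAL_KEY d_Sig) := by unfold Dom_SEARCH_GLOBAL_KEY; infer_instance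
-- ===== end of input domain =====

-- B groups each dotless key under its prefix in ONE pass (dict.setdefault), instead of A's
-- prefix map plus one scan of all keys per distinct prefix. Equivalence is about the RETURN value.

-- S.split('_')[0]  (split with a nonempty separator is never empty, so [0] never raises)
def pvPref (S : String) : String := ((PySem.Str.split? S "_").getD []).headD ""

-- ===== PORT A =====
def SEARCH_GLOBAL_KEY (d_Sig : List (String × Int)) : List (String × List String) :=
  -- for S in d_Sig: if '.' not in S: d_Glo[S] = S.split('_')[0]; l_Key.append(...)
  let st := (d_Sig.map Prod.fst).foldl
    (fun (st : PySem.Dict String String × List String) S =>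
      if PySem.Str.isIn "." S then st
      else (st.1.insert S (pvPref S), st.2 ++ [pvPref S]))
    (PySem.Dict.empty, [])
  let d_Glo := st.1
  let l_Key_set : PySem.Set String := PySem.Set.ofList st.2
  -- for K in l_Key_set: l_ = [S for S in d_Glo if K == d_Glo[S]]; d_Key[K] = l_
  let d_Key := l_Key_set.foldl
    (fun (d : PySem.Dict String (List String)) K =>
      let l_ := d_Glo.keys.foldl
        (fun (acc : List String) S =>
          if d_Glo.get? S == some K then acc ++ [S] else acc) []
      d.insert K l_)
    PySem.Dict.empty
  d_Key.items

-- ===== PORT B =====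
def SEARCH_GLOBAL_KEY_alt (d_Sig : List (String × Int)) : List (String × List String) :=
  -- for S in d_Sig: if '.' not in S: d_Key.setdefault(S.split('_')[0], []).append(S)
  (d_Sig.foldl
    (fun (d : PySem.Dict String (List String)) p =>
      if PySem.Str.isIn "." p.1 then d
      else d.insert (pvPref p.1) (d.getD (pvPref p.1) [] ++ [p.1]))
    PySem.Dict.empty).items

-- ===== PRECONDITION & SPEC =====
-- Pre_ excludes association lists with duplicate keys: they do not correspond to a Python
-- dict (Python collapses duplicates before either function runs), so the list form is outside
-- the functions' real domain.
def Pre_SEARCH_GLOBAL_KEY (d_Sig : List (String × Int)) : Prop := (d_Sig.map Prod.fst).Nodup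
instance (d_Sig : List (String × Int)) : Decidable (Pre_SEARCH_GLOBAL_KEY d_Sig) := by unfold Pre_SEARCH_GLOBAL_KEY; infer_instance
def pvWitness_SEARCH_GLOBAL_KEY : (List (String × Int)) := [("cpu_load", 1), ("cpu_temp", 2), ("net.rx", 3), ("mem", 4)]
def Spec_SEARCH_GLOBAL_KEY (d_Sig : List (String × Int)) (out : List (String × List String)) : Prop := out = SEARCH_GLOBAL_KEY_alt d_Sig
instance (d_Sig : List (String × Int)) (out : List (String × List String)) : Decidable (Spec_SEARCH_GLOBAL_KEY d_Sig out) := by unfold Spec_SEARCH_GLOBAL_KEY; infer_instance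

-- ===== CLAIM (what is proved, stated in full; the proofs are below) =====
def Claim_equal_SEARCH_GLOBAL_KEY : Prop := ∀ (d_Sig : List (String × Int)), Dom_SEARCH_GLOBAL_KEY d_Sig → Pre_SEARCH_GLOBAL_KEY d_Sig → Spec_SEARCH_GLOBAL_KEY d_Sig (SEARCH_GLOBAL_KEY d_Sig)

-- ===== LEMMAS AND PROOFS =====

-- 'for a in l: if p(a): skip else: step' = fold over the kept elements
theorem pvFoldlIfNot {α β : Type} (p : α → Bool) (f : β → α → β) (l : List α) (init : β) :
    l.foldl (fun b a => if p a then b else f b a) init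
      = (l.filter (fun a => !p a)).foldl f init := by
  induction l generalizing init with
  | nil => rfl
  | cons x xs ih => by_cases h : p x = true <;> simp [h, ih]

-- a fold over pairs that only looks at the first components
theorem pvFoldFst {β : Type} (f : β → String → β) (l : List (String × Int)) (init : β) :
    l.foldl (fun b p => f b p.1) init = (l.map Prod.fst).foldl f init := by
  induction l generalizing init with
  | nil => rfl
  | cons x xs ih => simp [ih]

-- the canonical grouping both programs compute
def pvGroups (L : List String) : List (String × List String) :=
  (PySem.Set.ofList (L.map pvPref)).map
    (fun K => (K, L.filter (fun S => pvPref S == K)))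

theorem pvGroups_keys (L : List String) :
    (pvGroups L).map Prod.fst = PySem.Set.ofList (L.map pvPref) := by
  simp [pvGroups, Function.comp_def]

-- B's grouping fold computes pvGroups (induction from the right)
theorem pvAltFold (L : List String) :
    (L.foldl (fun (d : PySem.Dict String (List String)) S =>
        d.insert (pvPref S) (d.getD (pvPref S) [] ++ [S])) PySem.Dict.empty).items
      = pvGroups L := by
  induction L using List.reverseRecOn with
  | nil => rfl
  | append_singleton M S ih =>
    set d := M.foldl (fun (d : PySem.Dict String (List String)) S =>
        d.insert (pvPref S) (d.getD (pvPref S) [] ++ [S])) PySem.Dict.empty with hd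
    have hkeys : d.keys = PySem.Set.ofList (M.map pvPref) := by
      have h1 := congrArg (List.map Prod.fst) ih
      rw [pvGroups_keys] at h1
      simpa [PySem.Dict.keys] using h1
    have hnodup : d.keys.Nodup := by rw [hkeys]; exact PySem.Set.nodup_ofList _
    have hofl : PySem.Set.ofList ((M ++ [S]).map pvPref)
        = PySem.Set.add (PySem.Set.ofList (M.map pvPref)) (pvPref S) := by
      simp [PySem.Set.ofList_eq_foldl, List.foldl_append]
    rw [List.foldl_append, List.foldl_cons, List.foldl_nil, ← hd]
    by_cases hc : d.contains (pvPref S) = true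
    · -- existing group: its list gets S appended, its position is kept
      have hmemK : pvPref S ∈ PySem.Set.ofList (M.map pvPref) := by
        have := (PySem.Dict.contains_iff_mem_keys d (pvPref S)).mp hc
        rwa [hkeys] at this
      have hmemI : (pvPref S, M.filter (fun S' => pvPref S' == pvPref S)) ∈ d.items := by
        rw [ih]
        exact List.mem_map_of_mem hmemK
      have hget : d.get? (pvPref S) = some (M.filter (fun S' => pvPref S' == pvPref S)) :=
        PySem.Dict.get?_of_mem_items d hmemI hnodup
      have hgetD : d.getD (pvPref S) [] = M.filter (fun S' => pvPref S' == pvPref S) :=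
        PySem.Dict.getD_of_get?_eq_some d [] hget
      rw [PySem.Dict.items_insert_of_contains d _ hc, hgetD, ih]
      unfold pvGroups
      rw [hofl, PySem.Set.add, if_pos (by simpa using hmemK), List.map_map]
      apply List.map_congr_left
      intro K hK
      by_cases hKe : K = pvPref S
      · subst hKe
        simp [List.filter_append]
      · have h2 : (pvPref S == K) = false := by
          simp only [beq_eq_false_iff_ne, ne_eq]
          exact fun h => hKe h.symm
        simp [h2, hKe, List.filter_append]
    · -- new group, appended at the end
      have hcf : d.contains (pvPref S) = false := by simpa using hc
      have hnm : pvPref S ∉ PySem.Set.ofList (M.map pvPref) := by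
        intro hm
        exact absurd ((PySem.Dict.contains_iff_mem_keys d (pvPref S)).mpr (hkeys ▸ hm)) hc
      have hfilt : M.filter (fun S' => pvPref S' == pvPref S) = [] := by
        rw [List.filter_eq_nil_iff]
        intro S' hS' hbeq
        exact hnm (by
          have h3 : pvPref S' = pvPref S := by simpa using hbeq
          rw [← h3]
          exact (PySem.Set.mem_ofList _ _).mpr (List.mem_map_of_mem hS'))
      have hgetD : d.getD (pvPref S) [] = [] := PySem.Dict.getD_of_not_contains d [] hcf
      rw [PySem.Dict.items_insert_of_not_contains d _ hcf, hgetD, ih]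
      unfold pvGroups
      rw [hofl, PySem.Set.add, if_neg (by simpa using hnm), List.map_append]
      congr 1
      · apply List.map_congr_left
        intro K hK
        have h2 : (pvPref S == K) = false := by
          simp only [beq_eq_false_iff_ne, ne_eq]
          rintro rfl
          exact hnm hK
        simp [List.filter_append, h2]
      · simp [List.filter_append, hfilt]

-- A's two passes also compute pvGroups, given distinct keys
theorem pvAFold (keys : List String) (hnd : keys.Nodup) :
    (let st := keys.foldl
        (fun (st : PySem.Dict String String × List String) S =>
          if PySem.Str.isIn "." S then st
          else (st.1.insert S (pvPref S), st.2 ++ [pvPref S]))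
        (PySem.Dict.empty, [])
     let d_Glo := st.1
     let l_Key_set : PySem.Set String := PySem.Set.ofList st.2
     let d_Key := l_Key_set.foldl
        (fun (d : PySem.Dict String (List String)) K =>
          let l_ := d_Glo.keys.foldl
            (fun (acc : List String) S =>
              if d_Glo.get? S == some K then acc ++ [S] else acc) []
          d.insert K l_)
        PySem.Dict.empty
     d_Key.items)
      = pvGroups (keys.filter (fun S => !PySem.Str.isIn "." S)) := by
  dsimp only
  rw [pvFoldlIfNot]
  set L := keys.filter (fun S => !PySem.Str.isIn "." S) with hL
  have hLnd : L.Nodup := hnd.filter _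
  have hsplit : L.foldl
      (fun (st : PySem.Dict String String × List String) S =>
        (st.1.insert S (pvPref S), st.2 ++ [pvPref S]))
      (PySem.Dict.empty, [])
      = (L.foldl (fun (d : PySem.Dict String String) S => d.insert S (pvPref S)) PySem.Dict.empty,
         L.foldl (fun (acc : List String) S => acc ++ [pvPref S]) []) := by
    induction L using List.reverseRecOn with
    | nil => rfl
    | append_singleton M S ih => simp [List.foldl_append, ih]
  rw [hsplit]
  dsimp only
  rw [PySem.List.foldl_append_singleton_eq_map pvPref L []]
  simp only [List.nil_append]
  set d_Glo := L.foldl (fun (d : PySem.Dict String String) S => d.insert S (pvPref S))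
      PySem.Dict.empty with hdG
  have hitems : d_Glo.items = L.map (fun S => (S, pvPref S)) := by
    have h := PySem.Dict.items_foldl_insert_fresh L (fun S => S) pvPref PySem.Dict.empty
      (fun a _ => by simp [PySem.Dict.contains_empty]) (by simpa using hLnd)
    rw [hdG]
    simpa using h
  have hkeys : d_Glo.keys = L := by
    simp [PySem.Dict.keys, hitems, Function.comp_def]
  have hknd : d_Glo.keys.Nodup := by rwa [hkeys]
  have hget : ∀ S ∈ L, d_Glo.get? S = some (pvPref S) := by
    intro S hS
    exact PySem.Dict.get?_of_mem_items d_Glo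
      (by rw [hitems]; exact List.mem_map_of_mem hS) hknd
  -- the inner scan over d_Glo picks out exactly the keys with prefix K
  have hinner : ∀ K : String, d_Glo.keys.foldl
      (fun (acc : List String) S =>
        if d_Glo.get? S == some K then acc ++ [S] else acc) []
      = L.filter (fun S => pvPref S == K) := by
    intro K
    rw [hkeys]
    refine (PySem.List.foldl_congr_mem' L _
      (fun (acc : List String) S => if pvPref S == K then acc ++ [S] else acc) [] ?_).trans ?_
    · intro S hS acc
      rw [hget S hS]
      simp
    · simpa using PySem.List.foldl_append_if_eq_filter (fun S => pvPref S == K) L []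
  simp only [hinner]
  -- the outer loop inserts each distinct prefix once, in first-occurrence order
  have hfresh := PySem.Dict.items_foldl_insert_fresh (PySem.Set.ofList (L.map pvPref))
    (fun K => K) (fun K => L.filter (fun S => pvPref S == K)) PySem.Dict.empty
    (fun a _ => by simp [PySem.Dict.contains_empty])
    (by simpa using PySem.Set.nodup_ofList (L.map pvPref))
  simpa [pvGroups] using hfresh

-- ===== VERDICT (by name: the statement is the Claim_ definition above) =====
theorem SEARCH_GLOBAL_KEY_spec : Claim_equal_SEARCH_GLOBAL_KEY := by
  intro d_Sig _ hpre
  unfold Spec_SEARCH_GLOBAL_KEY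
  have hA : SEARCH_GLOBAL_KEY d_Sig
      = pvGroups ((d_Sig.map Prod.fst).filter (fun S => !PySem.Str.isIn "." S)) :=
    pvAFold (d_Sig.map Prod.fst) hpre
  have hB : SEARCH_GLOBAL_KEY_alt d_Sig
      = pvGroups ((d_Sig.map Prod.fst).filter (fun S => !PySem.Str.isIn "." S)) := by
    have e1 : SEARCH_GLOBAL_KEY_alt d_Sig
        = ((d_Sig.map Prod.fst).foldl
            (fun (d : PySem.Dict String (List String)) S =>
              if PySem.Str.isIn "." S then d
              else d.insert (pvPref S) (d.getD (pvPref S) [] ++ [S]))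
            PySem.Dict.empty).items :=
      congrArg PySem.Dict.items (pvFoldFst
        (fun (d : PySem.Dict String (List String)) S =>
          if PySem.Str.isIn "." S then d
          else d.insert (pvPref S) (d.getD (pvPref S) [] ++ [S])) d_Sig PySem.Dict.empty)
    rw [e1, pvFoldlIfNot, pvAltFold]
  rw [hA, hB]
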